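-- pv_equiv track=rewrite | github.com/thatjelvin/Bundesliga-winner | ml_backend/feature_engineering.py | _calculate_unbeaten_streak
-- ===== SOURCE A (Python) =====
-- from typing import Dict, List, Tuple
--
-- def _calculate_unbeaten_streak(results: List[str]) -> int:
--     """Calculate current unbeaten streak (wins + draws)"""
--     streak = 0
--     for result in reversed(results):
--         if result in ['W', 'D']:
--             streak += 1
--         else:
--             break
--     return streak
-- ===== SOURCE B (Python) =====
-- def _calculate_unbeaten_streak(results):
--     """Calculate current unbeaten streak (wins + draws)"""
--     streak = 0
--     for result in results:
--         if result in ('W', 'D'):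
--             streak += 1
--         else:
--             streak = 0
--     return streak
-- ===== Notes on version B (the rewrite author's own statement) =====
-- stated objective: alternative
-- what changed: Single forward pass that resets the counter on any non-W/D result, instead of reversing the list and breaking out of a backward scan.
import Mathlib
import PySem

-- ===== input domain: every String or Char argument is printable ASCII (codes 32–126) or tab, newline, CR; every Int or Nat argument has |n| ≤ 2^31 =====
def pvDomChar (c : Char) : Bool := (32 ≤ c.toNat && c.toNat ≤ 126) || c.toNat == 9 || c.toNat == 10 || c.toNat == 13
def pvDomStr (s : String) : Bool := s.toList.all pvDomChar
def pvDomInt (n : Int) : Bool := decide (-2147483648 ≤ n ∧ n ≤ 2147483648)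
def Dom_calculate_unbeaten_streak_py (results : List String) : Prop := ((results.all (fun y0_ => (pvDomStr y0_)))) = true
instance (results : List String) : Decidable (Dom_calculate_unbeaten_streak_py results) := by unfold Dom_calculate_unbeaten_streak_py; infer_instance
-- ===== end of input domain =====

-- ===== PORT A =====
-- A: walk the reversed list, adding 1 per 'W'/'D' and stopping at the first other result
def pvGoA : List String → Int
  | [] => 0
  | r :: rest => if r = "W" ∨ r = "D" then 1 + pvGoA rest else 0

def calculate_unbeaten_streak_py (results : List String) : Int :=
  pvGoA results.reverse

-- ===== PORT B =====
-- B: one forward pass; any non-W/D result resets the counter to 0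
def calculate_unbeaten_streak_py_alt (results : List String) : Int :=
  results.foldl (fun streak r => if r = "W" ∨ r = "D" then streak + 1 else 0) 0

-- ===== PRECONDITION & SPEC =====
def Spec_calculate_unbeaten_streak_py (results : List String) (out : Int) : Prop := out = calculate_unbeaten_streak_py_alt results
instance (results : List String) (out : Int) : Decidable (Spec_calculate_unbeaten_streak_py results out) := by unfold Spec_calculate_unbeaten_streak_py; infer_instance

-- ===== CLAIM (what is proved, stated in full; the proofs are below) =====
def Claim_equal_calculate_unbeaten_streak_py : Prop := ∀ (results : List String), Dom_calculate_unbeaten_streak_py results → Spec_calculate_unbeaten_streak_py results (calculate_unbeaten_streak_py results)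

-- ===== LEMMAS AND PROOFS =====

-- ===== VERDICT (by name: the statement is the Claim_ definition above) =====
lemma pvAB (l : List String) :
    l.foldl (fun streak r => if r = "W" ∨ r = "D" then streak + 1 else 0) 0 = pvGoA l.reverse := by
  induction l using List.reverseRecOn with
  | nil => rfl
  | append_singleton l' x ih =>
      rw [List.foldl_append, List.reverse_append]
      simp only [List.foldl_cons, List.foldl_nil, List.reverse_singleton, List.singleton_append,
        pvGoA, ih]
      split_ifs with h <;> omega

theorem calculate_unbeaten_streak_py_spec : Claim_equal_calculate_unbeaten_streak_py := by
  intro results _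
  unfold Spec_calculate_unbeaten_streak_py calculate_unbeaten_streak_py calculate_unbeaten_streak_py_alt
  exact (pvAB results).symm
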